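-- pv_equiv track=rewrite | github.com/dom-dang/bioinformatics | lab5.py | lineChecker
-- ===== SOURCE A (Python) =====
-- def lineChecker (line):
--     validChar = ["A", "T", "C", "G", "a", "t", "c", "g"," ", "/t"]
--     flag = 0
--     for letter in line:
--         for char in validChar:
--             if letter == char:
--                 flag +=1
--     if (flag == getLength(line)):
--         return (True)
--     else:
--         return (False)
--
-- def getLength(word):
--     num = 0
--     for thing in word:
--          num +=1
--     return (num)
-- ===== SOURCE B (Python) =====
-- def lineChecker(line):
--     valid = {"A", "T", "C", "G", "a", "t", "c", "g", " ", "/t"}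
--     return set(line) <= valid
-- ===== Notes on version B (the rewrite author's own statement) =====
-- stated objective: faster
-- what changed: B deduplicates the line into the set of its distinct characters and returns a single subset test against the valid-symbol set, instead of A's nested loops that compare every character against all 10 valid symbols and compare the match count to a hand-rolled length.
import Mathlib
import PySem

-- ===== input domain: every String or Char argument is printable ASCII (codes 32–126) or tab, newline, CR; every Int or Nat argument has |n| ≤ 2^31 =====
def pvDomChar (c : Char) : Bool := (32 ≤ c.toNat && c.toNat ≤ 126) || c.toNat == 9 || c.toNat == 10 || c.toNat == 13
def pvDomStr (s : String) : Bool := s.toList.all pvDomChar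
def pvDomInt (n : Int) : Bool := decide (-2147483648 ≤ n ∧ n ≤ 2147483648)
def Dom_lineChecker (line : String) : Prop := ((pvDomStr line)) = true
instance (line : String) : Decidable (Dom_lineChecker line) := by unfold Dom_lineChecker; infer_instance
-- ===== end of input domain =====

-- B builds the set of distinct characters of the line and returns one subset test against the
-- valid-symbol set, instead of A's nested count-every-match loops compared to a hand-rolled length.

-- ===== PORT A =====
-- helper getLength from the same module: counts characters one by one
def pvGetLength (word : String) : Nat :=
  word.toList.foldl (fun num _ => num + 1) 0

def pvValidChar : List String := ["A", "T", "C", "G", "a", "t", "c", "g", " ", "/t"]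

def lineChecker (line : String) : Bool :=
  -- flag counts, for each letter, every member of validChar equal to it
  let flag := line.toList.foldl
    (fun flag letter =>
      pvValidChar.foldl (fun flag ch => if String.ofList [letter] == ch then flag + 1 else flag) flag)
    0
  if flag == pvGetLength line then true else false

-- ===== PORT B =====
def lineChecker_alt (line : String) : Bool :=
  let valid : PySem.Set String := PySem.Set.ofList ["A", "T", "C", "G", "a", "t", "c", "g", " ", "/t"]
  PySem.Set.issubset (PySem.Set.ofList (line.toList.map (fun c => String.ofList [c]))) valid

-- ===== PRECONDITION & SPEC =====
def Spec_lineChecker (line : String) (out : Bool) : Prop := out = lineChecker_alt line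
instance (line : String) (out : Bool) : Decidable (Spec_lineChecker line out) := by unfold Spec_lineChecker; infer_instance

-- ===== CLAIM (what is proved, stated in full; the proofs are below) =====
def Claim_equal_lineChecker : Prop := ∀ (line : String), Dom_lineChecker line → Spec_lineChecker line (lineChecker line)

-- ===== LEMMAS AND PROOFS =====

def pvIsValid (c : Char) : Bool := c ∈ (['A', 'T', 'C', 'G', 'a', 't', 'c', 'g', ' '] : List Char)

lemma pv_single_eq (c : Char) (s : String) : (String.ofList [c] = s) ↔ s.toList = [c] := by
  constructor
  · intro h; rw [← h]; simp
  · intro h; rw [← h]; simp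

lemma pv_valid_cases (c : Char) : pvIsValid c = true ↔
    c = 'A' ∨ c = 'T' ∨ c = 'C' ∨ c = 'G' ∨ c = 'a' ∨ c = 't' ∨ c = 'c' ∨ c = 'g' ∨ c = ' ' := by
  simp [pvIsValid]

lemma pv_not_valid (c : Char) (h : ¬ pvIsValid c = true) (s : String) (hs : s ∈ pvValidChar) :
    ¬ String.ofList [c] = s := by
  rw [pv_valid_cases] at h
  push Not at h
  obtain ⟨h1, h2, h3, h4, h5, h6, h7, h8, h9⟩ := h
  intro he
  rw [pv_single_eq] at he
  fin_cases hs <;>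
    simp_all [show ("A" : String).toList = ['A'] from by decide,
      show ("T" : String).toList = ['T'] from by decide,
      show ("C" : String).toList = ['C'] from by decide,
      show ("G" : String).toList = ['G'] from by decide,
      show ("a" : String).toList = ['a'] from by decide,
      show ("t" : String).toList = ['t'] from by decide,
      show ("c" : String).toList = ['c'] from by decide,
      show ("g" : String).toList = ['g'] from by decide,
      show (" " : String).toList = [' '] from by decide,
      show ("/t" : String).toList = ['/', 't'] from by decide, eq_comm]

lemma pv_mem_validChar (c : Char) : (String.ofList [c] ∈ pvValidChar) ↔ pvIsValid c = true := by
  by_cases h : pvIsValid c = true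
  · simp only [h, iff_true]
    rcases (pv_valid_cases c).mp h with rfl | rfl | rfl | rfl | rfl | rfl | rfl | rfl | rfl <;> decide
  · exact iff_of_false (fun hmem => pv_not_valid c h _ hmem rfl) h

lemma pv_foldl_count (x : String) (l : List String) (f : Nat) :
    l.foldl (fun flag ch => if x == ch then flag + 1 else flag) f
      = f + l.countP (fun ch => x == ch) := by
  induction l generalizing f with
  | nil => simp
  | cons s l ih =>
    rw [List.foldl_cons, List.countP_cons]
    by_cases h : (x == s) = true <;> rw [ih] <;> simp [h] <;> try omega

lemma pv_inner_count (c : Char) :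
    pvValidChar.countP (fun ch => String.ofList [c] == ch) = if pvIsValid c then 1 else 0 := by
  by_cases h : pvIsValid c = true
  · rw [if_pos h]
    rcases (pv_valid_cases c).mp h with rfl | rfl | rfl | rfl | rfl | rfl | rfl | rfl | rfl <;> decide
  · rw [if_neg h, List.countP_eq_zero]
    intro s hs
    simpa using pv_not_valid c h s hs

lemma pv_flag_eq (l : List Char) (f : Nat) :
    l.foldl
      (fun flag letter =>
        pvValidChar.foldl (fun flag ch => if String.ofList [letter] == ch then flag + 1 else flag) flag)
      f = f + l.countP pvIsValid := by
  induction l generalizing f with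
  | nil => simp
  | cons c l ih =>
    rw [List.foldl_cons, pv_foldl_count, pv_inner_count, ih, List.countP_cons]
    by_cases h : pvIsValid c <;> simp [h] <;> try omega

lemma pv_getLength_eq (word : String) : pvGetLength word = word.toList.length := by
  unfold pvGetLength
  induction word.toList with
  | nil => rfl
  | cons c l ih =>
    rw [List.foldl_cons, List.length_cons, ← ih]
    clear ih
    rw [show ∀ (n : Nat), l.foldl (fun num _ => num + 1) n = n + l.foldl (fun num _ => num + 1) 0 from ?_]
    · omega
    · induction l with
      | nil => simp
      | cons d l ih => intro n; rw [List.foldl_cons, List.foldl_cons, ih, ih 1]; omega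

lemma pv_A_eq (line : String) :
    lineChecker line = true ↔ ∀ c ∈ line.toList, pvIsValid c = true := by
  unfold lineChecker
  simp only [pv_flag_eq]
  simp only [pv_getLength_eq, Nat.zero_add, beq_iff_eq]
  by_cases hc : List.countP pvIsValid line.toList = line.toList.length
  · rw [if_pos hc]
    simp only [true_iff]
    exact List.countP_eq_length.mp hc
  · rw [if_neg hc]
    simp only [Bool.false_eq_true, false_iff]
    intro h
    exact hc (List.countP_eq_length.mpr h)

lemma pv_B_eq (line : String) :
    lineChecker_alt line = true ↔ ∀ c ∈ line.toList, pvIsValid c = true := by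
  unfold lineChecker_alt
  rw [PySem.Set.issubset_iff]
  constructor
  · intro h c hc
    have hm : String.ofList [c] ∈ PySem.Set.ofList (line.toList.map (fun d => String.ofList [d])) := by
      rw [PySem.Set.mem_ofList]
      exact List.mem_map_of_mem hc
    have hv := h _ hm
    rw [PySem.Set.mem_ofList] at hv
    exact (pv_mem_validChar c).mp hv
  · intro h x hx
    rw [PySem.Set.mem_ofList] at hx ⊢
    obtain ⟨c, hc, rfl⟩ := List.mem_map.mp hx
    exact (pv_mem_validChar c).mpr (h c hc)

-- ===== VERDICT (by name: the statement is the Claim_ definition above) =====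
theorem lineChecker_spec : Claim_equal_lineChecker := by
  intro line _
  unfold Spec_lineChecker
  have ha := pv_A_eq line
  have hb := pv_B_eq line
  cases h : lineChecker_alt line with
  | true => exact ha.mpr (hb.mp h)
  | false =>
    cases h2 : lineChecker line with
    | false => rfl
    | true => rw [← h, hb.mpr (ha.mp h2)]
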